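-- pv_equiv track=rewrite | github.com/szidanne/advent-of-code-2025 | day6/common.py | split_problem_blocks
-- ===== SOURCE A (Python) =====
-- def split_problem_blocks(grid):
--     # returns list of (start_col, end_col) blocks
--     rows = len(grid)
--     cols = len(grid[0]) if rows else 0
--
--     def col_is_blank(c):
--         for r in range(rows):
--             if grid[r][c] != " ":
--                 return False
--         return True
--
--     blocks = []
--     c = 0
--     while c < cols:
--         while c < cols and col_is_blank(c):
--             c += 1
--         if c >= cols:
--             break
--         start = c
--         while c < cols and not col_is_blank(c):
--             c += 1
--         end = c
--         blocks.append((start, end))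
--     return blocks
-- ===== SOURCE B (Python) =====
-- def split_problem_blocks(grid):
--     # returns list of (start_col, end_col) blocks
--     rows = len(grid)
--     cols = len(grid[0]) if rows else 0
--
--     def col_is_blank(c):
--         for r in range(rows):
--             if grid[r][c] != " ":
--                 return False
--         return True
--
--     blank = [col_is_blank(c) for c in range(cols)]
--     starts = [c for c in range(cols) if not blank[c] and (c == 0 or blank[c - 1])]
--     ends = [c + 1 for c in range(cols) if not blank[c] and (c == cols - 1 or blank[c + 1])]
--     return list(zip(starts, ends))
-- ===== Notes on version B (the rewrite author's own statement) =====
-- stated objective: alternative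
-- what changed: Replaced A's cursor-driven twin-while run extraction by boundary detection: materialize the blank-column flags once, then compute the list of block starts (non-blank column whose left neighbour is blank or the left edge) and block ends (non-blank column whose right neighbour is blank or the right edge) as two independent comprehensions and pair them with zip; col_is_blank is kept verbatim.
import Mathlib
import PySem

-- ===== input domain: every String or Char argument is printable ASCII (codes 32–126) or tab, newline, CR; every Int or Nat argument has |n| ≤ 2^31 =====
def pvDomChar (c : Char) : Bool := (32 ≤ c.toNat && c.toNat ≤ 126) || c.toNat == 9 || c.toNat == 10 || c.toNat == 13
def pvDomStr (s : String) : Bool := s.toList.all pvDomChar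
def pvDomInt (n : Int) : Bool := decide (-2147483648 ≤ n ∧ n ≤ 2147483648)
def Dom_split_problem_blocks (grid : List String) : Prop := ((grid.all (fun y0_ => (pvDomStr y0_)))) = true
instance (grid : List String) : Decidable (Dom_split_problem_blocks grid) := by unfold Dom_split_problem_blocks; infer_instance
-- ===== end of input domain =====

-- B replaces A's twin-while run extraction by boundary detection: blank flags computed once,
-- block starts and ends found by two independent neighbour scans, paired with zip (alternative
-- decomposition, same cost).
-- ===== PORT A =====
-- col_is_blank: scan the rows at column c, early-return False at the first non-space.
-- grid[r][c] is ported as pyGetD with default ' '; under Pre_ the default is never hit (Python raises IndexError exactly there).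
def pvColBlankGo (c : Int) : List String → Bool
  | [] => true
  | row :: rest => if PySem.List.pyGetD row.toList c ' ' ≠ ' ' then false else pvColBlankGo c rest

def pvColBlank (grid : List String) (c : Int) : Bool := pvColBlankGo c grid

-- inner `while c < cols and col_is_blank(c): c += 1` (fuel is only a totality guard;
-- (cols - c).toNat steps always suffice, see the *_stop/*_step equations below the claim)
def pvSkip (grid : List String) (cols : Int) : Nat → Int → Int
  | 0, c => c
  | fuel + 1, c =>
    if c < cols ∧ pvColBlank grid c = true then pvSkip grid cols fuel (c + 1) else c

def pvSkipF (grid : List String) (cols c : Int) : Int :=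
  pvSkip grid cols (cols - c).toNat c

-- inner `while c < cols and not col_is_blank(c): c += 1`
def pvCollect (grid : List String) (cols : Int) : Nat → Int → Int
  | 0, c => c
  | fuel + 1, c =>
    if c < cols ∧ pvColBlank grid c = false then pvCollect grid cols fuel (c + 1) else c

def pvCollectF (grid : List String) (cols c : Int) : Int :=
  pvCollect grid cols (cols - c).toNat c

-- outer `while c < cols: …` loop of A (fuel is only a totality guard: c strictly grows each turn)
def pvOuter (grid : List String) (cols : Int) : Nat → Int → List (Int × Int) → List (Int × Int)
  | 0, _, blocks => blocks
  | fuel + 1, c, blocks =>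
    if c < cols then
      if cols ≤ pvSkipF grid cols c then blocks
      else pvOuter grid cols fuel (pvCollectF grid cols (pvSkipF grid cols c))
             (blocks ++ [(pvSkipF grid cols c, pvCollectF grid cols (pvSkipF grid cols c))])
    else blocks

def pvOuterF (grid : List String) (cols c : Int) (blocks : List (Int × Int)) : List (Int × Int) :=
  pvOuter grid cols ((cols - c).toNat + 1) c blocks

def split_problem_blocks (grid : List String) : List (Int × Int) :=
  let cols : Int := match grid with | [] => 0 | g0 :: _ => (g0.toList.length : Int)
  pvOuterF grid cols 0 []

-- ===== PORT B =====
-- Source B's col_is_blank is character-for-character A's, so its port pvColBlank is shared.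
-- blank = [col_is_blank(c) for c in range(cols)]; starts/ends are the two comprehensions;
-- blank[c-1] / blank[c+1] are ported as pyGetD with default false — the guarding `c == 0` /
-- `c == cols - 1` disjunct makes the index in range whenever the lookup matters.
def split_problem_blocks_alt (grid : List String) : List (Int × Int) :=
  let cols : Int := match grid with | [] => 0 | g0 :: _ => (g0.toList.length : Int)
  let blank : List Bool := (PySem.List.pyRange 0 cols 1).map (pvColBlank grid)
  let starts : List Int := (PySem.List.pyRange 0 cols 1).filter
      (fun c => !PySem.List.pyGetD blank c false &&
        (c == 0 || PySem.List.pyGetD blank (c - 1) false))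
  let ends : List Int := ((PySem.List.pyRange 0 cols 1).filter
      (fun c => !PySem.List.pyGetD blank c false &&
        (c == cols - 1 || PySem.List.pyGetD blank (c + 1) false))).map (fun c => c + 1)
  List.zip starts ends

-- ===== PRECONDITION & SPEC =====
-- Pre_ holds exactly where Python's A (and B) return: it excludes only the ragged grids on which
-- col_is_blank raises IndexError, i.e. some column c < len(grid[0]) reaches a row shorter than c+1
-- after seeing only in-range spaces in the earlier rows.
def Pre_split_problem_blocks (grid : List String) : Prop :=
  ∀ c < (grid.headD "").toList.length, ∀ r < grid.length,
    (∀ r' < r, c < (grid.getD r' "").toList.length ∧ (grid.getD r' "").toList.getD c ' ' = ' ') →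
    c < (grid.getD r "").toList.length
instance (grid : List String) : Decidable (Pre_split_problem_blocks grid) := by
  unfold Pre_split_problem_blocks; infer_instance

def pvWitness_split_problem_blocks : List String := ["a b", "c d"]

def Spec_split_problem_blocks (grid : List String) (out : List (Int × Int)) : Prop := out = split_problem_blocks_alt grid
instance (grid : List String) (out : List (Int × Int)) : Decidable (Spec_split_problem_blocks grid out) := by unfold Spec_split_problem_blocks; infer_instance

-- ===== CLAIM (what is proved, stated in full; the proofs are below) =====
def Claim_equal_split_problem_blocks : Prop := ∀ (grid : List String), Dom_split_problem_blocks grid → Pre_split_problem_blocks grid → Spec_split_problem_blocks grid (split_problem_blocks grid)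

-- ===== LEMMAS AND PROOFS =====

-- proof-only middle layer: the one-pass state machine (blocks so far, optional open-run start),
-- used as a stepping stone between A's cursor loops and B's boundary lists
def pvStep (grid : List String) (st : List (Int × Int) × Option Int) (c : Int) :
    List (Int × Int) × Option Int :=
  if pvColBlank grid c then
    match st with
    | (blocks, some s) => (blocks ++ [(s, c)], none)
    | (blocks, none) => (blocks, none)
  else
    match st with
    | (blocks, none) => (blocks, some c)
    | (blocks, some s) => (blocks, some s)

def pvFin (cols : Int) (st : List (Int × Int) × Option Int) : List (Int × Int) :=
  match st with
  | (blocks, some s) => blocks ++ [(s, cols)]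
  | (blocks, none) => blocks

-- proof-only: B's boundary lists written as recursion over the remaining columns.
-- pvHead grid i n = "the column list starting at i with n entries starts blank (or is empty)"
def pvHead (grid : List String) (i : Int) : Nat → Bool
  | 0 => true
  | _ + 1 => pvColBlank grid i

-- starts among the n columns from i, p = "the previous column was blank (or left edge)"
def pvS (grid : List String) : Bool → Int → Nat → List Int
  | _, _, 0 => []
  | p, i, n + 1 =>
    (if p = true ∧ pvColBlank grid i = false then [i] else []) ++
      pvS grid (pvColBlank grid i) (i + 1) n

-- exclusive ends among the n columns from i
def pvE (grid : List String) : Int → Nat → List Int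
  | _, 0 => []
  | i, n + 1 =>
    (if pvColBlank grid i = false ∧ pvHead grid (i + 1) n = true then [i + 1] else []) ++
      pvE grid (i + 1) n

-- the two unfolding equations of the skip loop, and its basic facts
theorem pvSkip_stop (grid : List String) (cols c : Int)
    (h : ¬(c < cols ∧ pvColBlank grid c = true)) : pvSkipF grid cols c = c := by
  unfold pvSkipF
  cases hf : (cols - c).toNat with
  | zero => rfl
  | succ n => rw [pvSkip, if_neg h]

theorem pvSkip_step (grid : List String) (cols c : Int) (hc : c < cols)
    (hb : pvColBlank grid c = true) : pvSkipF grid cols c = pvSkipF grid cols (c + 1) := by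
  unfold pvSkipF
  rw [show (cols - c).toNat = (cols - (c + 1)).toNat + 1 by omega, pvSkip, if_pos ⟨hc, hb⟩]

theorem pvSkip_ge_fuel (grid : List String) (cols : Int) :
    ∀ (fuel : Nat) (c : Int), c ≤ pvSkip grid cols fuel c := by
  intro fuel
  induction fuel with
  | zero => intro c; simp [pvSkip]
  | succ n ih =>
    intro c
    rw [pvSkip]
    split_ifs with h
    · have := ih (c + 1); omega
    · omega

theorem pvSkipF_ge (grid : List String) (cols c : Int) : c ≤ pvSkipF grid cols c :=
  pvSkip_ge_fuel grid cols _ c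

theorem pvSkip_blank_false_fuel (grid : List String) (cols : Int) :
    ∀ (fuel : Nat) (c : Int), (cols - c).toNat = fuel →
      pvSkip grid cols fuel c < cols → pvColBlank grid (pvSkip grid cols fuel c) = false := by
  intro fuel
  induction fuel with
  | zero => intro c hf hlt; simp only [pvSkip] at hlt ⊢; omega
  | succ n ih =>
    intro c hf hlt
    rw [pvSkip] at hlt ⊢
    split_ifs at hlt ⊢ with h
    · exact ih (c + 1) (by omega) hlt
    · rcases Bool.eq_false_or_eq_true (pvColBlank grid c) with hb | hb
      · exact absurd ⟨hlt, hb⟩ h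
      · exact hb

theorem pvSkipF_blank_false (grid : List String) (cols c : Int)
    (h : pvSkipF grid cols c < cols) : pvColBlank grid (pvSkipF grid cols c) = false :=
  pvSkip_blank_false_fuel grid cols _ c rfl h

-- same for the collect loop
theorem pvCollect_stop (grid : List String) (cols c : Int)
    (h : ¬(c < cols ∧ pvColBlank grid c = false)) : pvCollectF grid cols c = c := by
  unfold pvCollectF
  cases hf : (cols - c).toNat with
  | zero => rfl
  | succ n => rw [pvCollect, if_neg h]

theorem pvCollect_step (grid : List String) (cols c : Int) (hc : c < cols)
    (hb : pvColBlank grid c = false) : pvCollectF grid cols c = pvCollectF grid cols (c + 1) := by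
  unfold pvCollectF
  rw [show (cols - c).toNat = (cols - (c + 1)).toNat + 1 by omega, pvCollect, if_pos ⟨hc, hb⟩]

theorem pvCollect_ge_fuel (grid : List String) (cols : Int) :
    ∀ (fuel : Nat) (c : Int), c ≤ pvCollect grid cols fuel c := by
  intro fuel
  induction fuel with
  | zero => intro c; simp [pvCollect]
  | succ n ih =>
    intro c
    rw [pvCollect]
    split_ifs with h
    · have := ih (c + 1); omega
    · omega

theorem pvCollectF_ge (grid : List String) (cols c : Int) : c ≤ pvCollectF grid cols c :=
  pvCollect_ge_fuel grid cols _ c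

theorem pvCollectF_gt (grid : List String) (cols c : Int) (hc : c < cols)
    (hb : pvColBlank grid c = false) : c < pvCollectF grid cols c := by
  rw [pvCollect_step grid cols c hc hb]
  have := pvCollectF_ge grid cols (c + 1)
  omega

-- any two sufficient fuels compute the same outer-loop result
theorem pvOuter_fuel (grid : List String) (cols : Int) :
    ∀ (fuel fuel' : Nat) (c : Int) (blocks : List (Int × Int)),
      (cols - c).toNat < fuel → (cols - c).toNat < fuel' →
      pvOuter grid cols fuel c blocks = pvOuter grid cols fuel' c blocks := by
  intro fuel
  induction fuel with
  | zero => intro fuel' c blocks h1 _; omega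
  | succ n ih =>
    intro fuel' c blocks h1 h2
    cases fuel' with
    | zero => omega
    | succ m =>
      rw [pvOuter, pvOuter]
      split_ifs with hc hs
      · rfl
      · have hge := pvSkipF_ge grid cols c
        have hgt := pvCollectF_gt grid cols (pvSkipF grid cols c) (by omega)
          (pvSkipF_blank_false grid cols c (by omega))
        exact ih m _ _ (by omega) (by omega)
      · rfl

-- the three unfolding equations of the outer loop
theorem pvOuter_neg (grid : List String) (cols c : Int) (blocks : List (Int × Int))
    (h : ¬ c < cols) : pvOuterF grid cols c blocks = blocks := by
  unfold pvOuterF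
  rw [pvOuter, if_neg h]

theorem pvOuter_skipdone (grid : List String) (cols c : Int) (blocks : List (Int × Int))
    (hc : c < cols) (h2 : cols ≤ pvSkipF grid cols c) : pvOuterF grid cols c blocks = blocks := by
  unfold pvOuterF
  rw [pvOuter, if_pos hc, if_pos h2]

theorem pvOuter_step (grid : List String) (cols c : Int) (blocks : List (Int × Int))
    (hc : c < cols) (h2 : ¬ cols ≤ pvSkipF grid cols c) :
    pvOuterF grid cols c blocks =
      pvOuterF grid cols (pvCollectF grid cols (pvSkipF grid cols c))
        (blocks ++ [(pvSkipF grid cols c, pvCollectF grid cols (pvSkipF grid cols c))]) := by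
  unfold pvOuterF
  rw [pvOuter, if_pos hc, if_neg h2]
  have hge := pvSkipF_ge grid cols c
  have hgt := pvCollectF_gt grid cols (pvSkipF grid cols c) (by omega)
    (pvSkipF_blank_false grid cols c (by omega))
  exact pvOuter_fuel grid cols _ _ _ _ (by omega) (by omega)

-- skipping one blank column does not change A's outer loop's result
theorem pvOuter_blank (grid : List String) (cols c : Int) (blocks : List (Int × Int))
    (hc : c < cols) (hb : pvColBlank grid c = true) :
    pvOuterF grid cols c blocks = pvOuterF grid cols (c + 1) blocks := by
  have hskip : pvSkipF grid cols c = pvSkipF grid cols (c + 1) := pvSkip_step grid cols c hc hb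
  by_cases h2 : cols ≤ pvSkipF grid cols c
  · rw [pvOuter_skipdone grid cols c blocks hc h2]
    by_cases hc1 : c + 1 < cols
    · rw [pvOuter_skipdone grid cols (c + 1) blocks hc1 (by omega)]
    · rw [pvOuter_neg grid cols (c + 1) blocks hc1]
  · have hc1 : c + 1 < cols := by
      have := pvSkipF_ge grid cols (c + 1); omega
    rw [pvOuter_step grid cols c blocks hc h2,
        pvOuter_step grid cols (c + 1) blocks hc1 (by omega), hskip]

-- the joint invariant: the state machine's fold from column c with a closed (none) / open (some s)
-- run computes exactly what A's outer loop computes from c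
theorem pvMain (grid : List String) (cols : Int) :
    ∀ n : Nat, ∀ c : Int, (cols - c).toNat = n →
    (∀ blocks, pvFin cols ((PySem.List.pyRange c cols 1).foldl (pvStep grid) (blocks, none)) =
        pvOuterF grid cols c blocks) ∧
    (∀ blocks s, c ≤ cols →
        pvFin cols ((PySem.List.pyRange c cols 1).foldl (pvStep grid) (blocks, some s)) =
        pvOuterF grid cols (pvCollectF grid cols c) (blocks ++ [(s, pvCollectF grid cols c)])) := by
  intro n
  induction n with
  | zero =>
    intro c hn
    have hc : cols ≤ c := by omega
    rw [PySem.List.pyRange_one_eq_nil hc]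
    constructor
    · intro blocks
      rw [pvOuter_neg grid cols c blocks (by omega)]
      rfl
    · intro blocks s hle
      have hcc : c = cols := by omega
      have hcol : pvCollectF grid cols c = c := pvCollect_stop grid cols c (by omega)
      rw [hcol, pvOuter_neg grid cols c _ (by omega), hcc]
      rfl
  | succ n ih =>
    intro c hn
    have hc : c < cols := by omega
    have hn' : (cols - (c + 1)).toNat = n := by omega
    rw [PySem.List.pyRange_one_cons hc]
    by_cases hb : pvColBlank grid c = true
    · constructor
      · intro blocks
        have hstep : pvStep grid (blocks, none) c = (blocks, none) := by simp [pvStep, hb]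
        rw [List.foldl_cons, hstep, (ih (c + 1) hn').1 blocks,
            pvOuter_blank grid cols c blocks hc hb]
      · intro blocks s _
        have hstep : pvStep grid (blocks, some s) c = (blocks ++ [(s, c)], none) := by
          simp [pvStep, hb]
        have hcol : pvCollectF grid cols c = c := by
          refine pvCollect_stop grid cols c ?_
          intro h; rw [h.2] at hb; simp at hb
        rw [List.foldl_cons, hstep, (ih (c + 1) hn').1 (blocks ++ [(s, c)]), hcol,
            pvOuter_blank grid cols c (blocks ++ [(s, c)]) hc hb]
    · have hb' : pvColBlank grid c = false := by simpa using hb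
      have hcol : pvCollectF grid cols c = pvCollectF grid cols (c + 1) :=
        pvCollect_step grid cols c hc hb'
      constructor
      · intro blocks
        have hstep : pvStep grid (blocks, none) c = (blocks, some c) := by simp [pvStep, hb']
        have hskip : pvSkipF grid cols c = c := by
          refine pvSkip_stop grid cols c ?_
          intro h; rw [h.2] at hb'; simp at hb'
        rw [List.foldl_cons, hstep, (ih (c + 1) hn').2 blocks c (by omega),
            pvOuter_step grid cols c blocks hc (by omega), hskip, hcol]
      · intro blocks s _
        have hstep : pvStep grid (blocks, some s) c = (blocks, some s) := by simp [pvStep, hb']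
        rw [List.foldl_cons, hstep, (ih (c + 1) hn').2 blocks s (by omega), hcol]

-- the state machine's fold equals the zipped boundary lists pvS/pvE
theorem pvBoundary (grid : List String) (cols : Int) :
    ∀ n : Nat, ∀ c : Int, c ≤ cols → (cols - c).toNat = n →
    (∀ blocks, pvFin cols ((PySem.List.pyRange c cols 1).foldl (pvStep grid) (blocks, none)) =
        blocks ++ List.zip (pvS grid true c n) (pvE grid c n)) ∧
    (∀ blocks s, pvFin cols ((PySem.List.pyRange c cols 1).foldl (pvStep grid) (blocks, some s)) =
        blocks ++ List.zip (s :: pvS grid false c n)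
          ((if pvHead grid c n = true then [c] else []) ++ pvE grid c n)) := by
  intro n
  induction n with
  | zero =>
    intro c hle hn
    have hcc : c = cols := by omega
    rw [PySem.List.pyRange_one_eq_nil (by omega)]
    constructor
    · intro blocks; simp [pvFin, pvS, pvE]
    · intro blocks s; simp [pvFin, pvS, pvE, pvHead, hcc]
  | succ n ih =>
    intro c hle hn
    have hc : c < cols := by omega
    have hn' : (cols - (c + 1)).toNat = n := by omega
    rw [PySem.List.pyRange_one_cons hc]
    by_cases hb : pvColBlank grid c = true
    · constructor
      · intro blocks
        have hstep : pvStep grid (blocks, none) c = (blocks, none) := by simp [pvStep, hb]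
        rw [List.foldl_cons, hstep, ((ih (c + 1) (by omega) hn').1 blocks)]
        simp [pvS, pvE, hb]
      · intro blocks s
        have hstep : pvStep grid (blocks, some s) c = (blocks ++ [(s, c)], none) := by
          simp [pvStep, hb]
        rw [List.foldl_cons, hstep, ((ih (c + 1) (by omega) hn').1 (blocks ++ [(s, c)]))]
        simp [pvS, pvE, pvHead, hb]
    · have hb' : pvColBlank grid c = false := by simpa using hb
      constructor
      · intro blocks
        have hstep : pvStep grid (blocks, none) c = (blocks, some c) := by simp [pvStep, hb']
        rw [List.foldl_cons, hstep, ((ih (c + 1) (by omega) hn').2 blocks c)]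
        simp [pvS, pvE, hb']
      · intro blocks s
        have hstep : pvStep grid (blocks, some s) c = (blocks, some s) := by simp [pvStep, hb']
        rw [List.foldl_cons, hstep, ((ih (c + 1) (by omega) hn').2 blocks s)]
        simp only [pvS, pvE, hb']
        rw [show pvHead grid c (n + 1) = pvColBlank grid c from rfl, hb']
        simp

-- B's starts comprehension equals pvS
theorem pvStartsEq (grid : List String) (cols : Int) :
    ∀ n : Nat, ∀ c : Int, 0 ≤ c → c ≤ cols → (cols - c).toNat = n → ∀ p : Bool,
      (p = (c == 0 || PySem.List.pyGetD ((PySem.List.pyRange 0 cols 1).map (pvColBlank grid)) (c - 1) false)) →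
      (PySem.List.pyRange c cols 1).filter
          (fun x => !PySem.List.pyGetD ((PySem.List.pyRange 0 cols 1).map (pvColBlank grid)) x false &&
            (x == 0 || PySem.List.pyGetD ((PySem.List.pyRange 0 cols 1).map (pvColBlank grid)) (x - 1) false)) =
        pvS grid p c n := by
  intro n
  induction n with
  | zero =>
    intro c _ _ hn p _
    rw [show PySem.List.pyRange c cols 1 = [] from PySem.List.pyRange_one_eq_nil (by omega)]
    simp [pvS]
  | succ n ih =>
    intro c hc0 hle hn p hp
    have hc : c < cols := by omega
    have hget : PySem.List.pyGetD ((PySem.List.pyRange 0 cols 1).map (pvColBlank grid)) c false =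
        pvColBlank grid c :=
      PySem.List.pyGetD_map_pyRange_of_nonneg _ _ _ _ hc0 hc
    have hp' : ((c + 1 : Int) == 0 ||
        PySem.List.pyGetD ((PySem.List.pyRange 0 cols 1).map (pvColBlank grid)) (c + 1 - 1) false) =
        pvColBlank grid c := by
      have : ((c + 1 : Int) == 0) = false := by simp; omega
      simp only [this, Bool.false_or, show c + 1 - 1 = c by ring, hget]
    rw [PySem.List.pyRange_one_cons hc, List.filter_cons,
        ih (c + 1) (by omega) (by omega) (by omega) (pvColBlank grid c) hp'.symm]
    by_cases hb : pvColBlank grid c = true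
    · simp [pvS, hget, hb]
    · have hb' : pvColBlank grid c = false := by simpa using hb
      cases p with
      | true => simp [pvS, hget, hb', ← hp]
      | false => simp [pvS, hget, hb', ← hp]

-- B's ends comprehension (filter then +1) equals pvE
theorem pvEndsEq (grid : List String) (cols : Int) :
    ∀ n : Nat, ∀ c : Int, 0 ≤ c → c ≤ cols → (cols - c).toNat = n →
      ((PySem.List.pyRange c cols 1).filter
          (fun x => !PySem.List.pyGetD ((PySem.List.pyRange 0 cols 1).map (pvColBlank grid)) x false &&
            (x == cols - 1 || PySem.List.pyGetD ((PySem.List.pyRange 0 cols 1).map (pvColBlank grid)) (x + 1) false))).map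
        (fun x => x + 1) =
        pvE grid c n := by
  intro n
  induction n with
  | zero =>
    intro c _ _ hn
    rw [show PySem.List.pyRange c cols 1 = [] from PySem.List.pyRange_one_eq_nil (by omega)]
    simp [pvE]
  | succ n ih =>
    intro c hc0 hle hn
    have hc : c < cols := by omega
    have hget : PySem.List.pyGetD ((PySem.List.pyRange 0 cols 1).map (pvColBlank grid)) c false =
        pvColBlank grid c :=
      PySem.List.pyGetD_map_pyRange_of_nonneg _ _ _ _ hc0 hc
    have hnext : ((c : Int) == cols - 1 ||
        PySem.List.pyGetD ((PySem.List.pyRange 0 cols 1).map (pvColBlank grid)) (c + 1) false) =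
        pvHead grid (c + 1) n := by
      cases n with
      | zero =>
        have : ((c : Int) == cols - 1) = true := by simp; omega
        simp [pvHead, this]
      | succ m =>
        have h1 : ((c : Int) == cols - 1) = false := by simp; omega
        have h2 : PySem.List.pyGetD ((PySem.List.pyRange 0 cols 1).map (pvColBlank grid)) (c + 1) false =
            pvColBlank grid (c + 1) :=
          PySem.List.pyGetD_map_pyRange_of_nonneg _ _ _ _ (by omega) (by omega)
        simp [pvHead, h1, h2]
    rw [PySem.List.pyRange_one_cons hc, List.filter_cons]
    by_cases hb : pvColBlank grid c = true
    · have : (!PySem.List.pyGetD ((PySem.List.pyRange 0 cols 1).map (pvColBlank grid)) c false &&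
          ((c : Int) == cols - 1 || PySem.List.pyGetD ((PySem.List.pyRange 0 cols 1).map (pvColBlank grid)) (c + 1) false)) = false := by
        simp [hget, hb]
      rw [this]
      simp only [if_false, Bool.false_eq_true]
      rw [ih (c + 1) (by omega) (by omega) (by omega)]
      simp [pvE, hb]
    · have hb' : pvColBlank grid c = false := by simpa using hb
      have hcond : (!PySem.List.pyGetD ((PySem.List.pyRange 0 cols 1).map (pvColBlank grid)) c false &&
          ((c : Int) == cols - 1 || PySem.List.pyGetD ((PySem.List.pyRange 0 cols 1).map (pvColBlank grid)) (c + 1) false)) =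
          pvHead grid (c + 1) n := by
        simp [hget, hb', hnext]
      rw [hcond]
      cases hh : pvHead grid (c + 1) n with
      | true =>
        simp only [if_true]
        rw [List.map_cons, ih (c + 1) (by omega) (by omega) (by omega)]
        simp [pvE, hb', hh]
      | false =>
        simp only [Bool.false_eq_true, if_false]
        rw [ih (c + 1) (by omega) (by omega) (by omega)]
        simp [pvE, hb', hh]

-- chaining everything: A = state machine = boundary lists = B
theorem pvFinal (grid : List String) : split_problem_blocks grid = split_problem_blocks_alt grid := by
  unfold split_problem_blocks split_problem_blocks_alt
  set cols : Int := match grid with | [] => 0 | g0 :: _ => (g0.toList.length : Int) with hcols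
  have h0 : 0 ≤ cols := by
    rw [hcols]; cases grid <;> simp
  have h1 : pvOuterF grid cols 0 [] =
      pvFin cols ((PySem.List.pyRange 0 cols 1).foldl (pvStep grid) ([], none)) :=
    ((pvMain grid cols ((cols - 0).toNat) 0 rfl).1 []).symm
  have h2 := (pvBoundary grid cols ((cols - 0).toNat) 0 h0 rfl).1 ([] : List (Int × Int))
  have h3 := pvStartsEq grid cols ((cols - 0).toNat) 0 le_rfl h0 rfl true (by simp)
  have h4 := pvEndsEq grid cols ((cols - 0).toNat) 0 le_rfl h0 rfl
  rw [h1, h2, ← h3, ← h4]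
  simp

-- ===== VERDICT (by name: the statement is the Claim_ definition above) =====
theorem split_problem_blocks_spec : Claim_equal_split_problem_blocks := by
  intro grid _ _
  exact pvFinal grid
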